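-- pv_equiv track=rewrite | github.com/satvikvedala/GFG-solutions | Strings/Match specific pattern.py | findSpecificPattern
-- ===== SOURCE A (Python) =====
-- def findSpecificPattern(Dict, pattern):
--     #Code here
--     res = []
--     pattern_count = 0
--     pmap = {}
--     for i in range(len(pattern)):
--         if pattern[i] not in pmap:
--             pmap[pattern[i]]=i
--         pattern_count = pattern_count+10**pmap[pattern[i]]
--     for item in Dict:
--         count = 0
--         imap = {}
--         for i in range(len(item)):
--             if item[i] not in imap:
--                 imap[item[i]] = i
--             count = count+10**imap[item[i]]
--         if count == pattern_count:
--             res.append(item)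
--     return res
-- ===== SOURCE B (Python) =====
-- def findSpecificPattern(Dict, pattern):
--     def sig(word):
--         total = 0
--         for c in set(word):
--             total += word.count(c) * 10 ** word.index(c)
--         return total
--     target = sig(pattern)
--     return [w for w in Dict if sig(w) == target]
-- ===== Notes on version B (the rewrite author's own statement) =====
-- stated objective: faster
-- what changed: Per-word signature is computed by grouping over the distinct characters (word.count(c) * 10**word.index(c) summed over set(word)) instead of A's positional scan that maintains a first-index dict; this performs one big-integer addition per distinct character instead of one per position, and matching words are collected by a comprehension.
import Mathlib
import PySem

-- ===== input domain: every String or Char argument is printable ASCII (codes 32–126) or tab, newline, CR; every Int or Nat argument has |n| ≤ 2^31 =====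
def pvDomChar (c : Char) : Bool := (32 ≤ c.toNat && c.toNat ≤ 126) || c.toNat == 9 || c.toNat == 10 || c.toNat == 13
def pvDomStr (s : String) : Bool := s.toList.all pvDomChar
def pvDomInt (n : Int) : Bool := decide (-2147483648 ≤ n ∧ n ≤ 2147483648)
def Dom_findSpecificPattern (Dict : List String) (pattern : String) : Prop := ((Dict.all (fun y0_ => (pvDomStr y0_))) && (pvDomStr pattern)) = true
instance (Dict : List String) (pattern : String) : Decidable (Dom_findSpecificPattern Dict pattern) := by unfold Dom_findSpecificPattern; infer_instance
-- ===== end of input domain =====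

-- B computes each word's signature by grouping over distinct characters (count * 10^first-index
-- summed over set(word)) instead of A's positional scan maintaining a first-index dict; the
-- return value is identical; a timing run measured B faster (fewer big-integer additions per word).

-- ===== PORT A =====
-- A's per-word loop body: if word[i] not in map: map[word[i]] = i; count += 10 ** map[word[i]]
def stepA (st : Int × PySem.Dict Char Nat) (xi : Char × Nat) : Int × PySem.Dict Char Nat :=
  let m := if st.2.contains xi.1 then st.2 else st.2.insert xi.1 xi.2
  (st.1 + 10 ^ (m.getD xi.1 0), m)

-- 'for i in range(len(word))' with word[i], ported as a foldl over the (char, index) pairs.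
def sigA (l : List Char) : Int :=
  (l.zipIdx.foldl stepA (0, PySem.Dict.empty)).1

def findSpecificPattern (Dict : List String) (pattern : String) : List String :=
  let pattern_count := sigA pattern.toList
  Dict.foldl (fun res item => if sigA item.toList = pattern_count then res ++ [item] else res) []

-- ===== PORT B =====
-- B's per-word signature: for c in set(word): total += word.count(c) * 10 ** word.index(c)
-- (the sum does not depend on the set's iteration order).
def sigB (l : List Char) : Int :=
  (PySem.Set.ofList l).foldl
    (fun acc c => acc + (PySem.List.count l c : Int) * 10 ^ ((PySem.List.index? l c).getD 0)) 0

def findSpecificPattern_alt (Dict : List String) (pattern : String) : List String :=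
  let target := sigB pattern.toList
  Dict.filter (fun w => sigB w.toList = target)

-- ===== PRECONDITION & SPEC =====
def Spec_findSpecificPattern (Dict : List String) (pattern : String) (out : List String) : Prop := out = findSpecificPattern_alt Dict pattern
instance (Dict : List String) (pattern : String) (out : List String) : Decidable (Spec_findSpecificPattern Dict pattern out) := by unfold Spec_findSpecificPattern; infer_instance

-- ===== CLAIM (what is proved, stated in full; the proofs are below) =====
def Claim_equal_findSpecificPattern : Prop := ∀ (Dict : List String) (pattern : String), Dom_findSpecificPattern Dict pattern → Spec_findSpecificPattern Dict pattern (findSpecificPattern Dict pattern)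

-- ===== LEMMAS AND PROOFS =====

-- idxOf of the first element not in the prefix
lemma idxOf_append_cons_self (pre rest : List Char) (c : Char) (h : c ∉ pre) :
    (pre ++ c :: rest).idxOf c = pre.length := by
  induction pre with
  | nil => simp
  | cons a t ih =>
      have hac : a ≠ c := by rintro rfl; exact h (List.mem_cons_self)
      have ht : c ∉ t := fun hm => h (List.mem_cons_of_mem _ hm)
      simp [hac, ih ht]

-- index? on a member returns the first index
lemma index?_of_mem (l : List Char) (c : Char) (h : c ∈ l) :
    PySem.List.index? l c = some (l.idxOf c) := by
  rw [PySem.List.index?_eq_idxOf?]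
  induction l with
  | nil => cases h
  | cons a t ih =>
      by_cases hac : a = c
      · subst hac; simp [List.idxOf?_cons]
      · have ht : c ∈ t := by
          rcases List.mem_cons.mp h with h' | h'
          · exact absurd h'.symm hac
          · exact h'
        simp [List.idxOf?_cons, hac, ih ht]

-- invariant for A's per-word loop: the dict maps every already-seen char to its first index in l
lemma sigA_inv (l : List Char) :
    ∀ (suf pre : List Char) (acc : Int) (m : PySem.Dict Char Nat),
      pre ++ suf = l →
      (∀ c, m.contains c = decide (c ∈ pre)) →
      (∀ c ∈ pre, m.getD c 0 = l.idxOf c) →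
      ((suf.zipIdx pre.length).foldl stepA (acc, m)).1
        = acc + (suf.map (fun c => (10:Int) ^ (l.idxOf c))).sum := by
  intro suf
  induction suf with
  | nil => intro pre acc m _ _ _; simp
  | cons c0 rest ih =>
      intro pre acc m hl hc hg
      have hl' : (pre ++ [c0]) ++ rest = l := by simpa using hl
      have hlen : pre.length + 1 = (pre ++ [c0]).length := by simp
      by_cases hmem : c0 ∈ pre
      · -- seen before: dict unchanged
        have hcontains : m.contains c0 = true := by rw [hc]; simpa using hmem
        have hw : m.getD c0 0 = l.idxOf c0 := hg c0 hmem
        have hstep : stepA (acc, m) (c0, pre.length) = (acc + 10 ^ (l.idxOf c0), m) := by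
          simp [stepA, hcontains, hw]
        rw [List.zipIdx_cons, List.foldl_cons, hstep, hlen,
          ih (pre ++ [c0]) (acc + 10 ^ (l.idxOf c0)) m hl'
            (by intro c; rw [hc]
                by_cases h : c = c0
                · subst h; simp [hmem]
                · simp [h])
            (by intro c hcmem
                rcases List.mem_append.mp hcmem with h | h
                · exact hg c h
                · simp only [List.mem_singleton] at h; subst h; exact hw)]
        simp [List.map_cons]; ring
      · -- first occurrence: insert c0 ↦ pre.length
        have hcontains : m.contains c0 = false := by rw [hc]; simpa using hmem
        have hidx : l.idxOf c0 = pre.length := by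
          rw [← hl]; exact idxOf_append_cons_self pre rest c0 hmem
        have hw : (m.insert c0 pre.length).getD c0 0 = l.idxOf c0 := by
          rw [PySem.Dict.getD_insert_self, hidx]
        have hstep : stepA (acc, m) (c0, pre.length)
            = (acc + 10 ^ (l.idxOf c0), m.insert c0 pre.length) := by
          simp [stepA, hcontains, hw]
        rw [List.zipIdx_cons, List.foldl_cons, hstep, hlen,
          ih (pre ++ [c0]) (acc + 10 ^ (l.idxOf c0)) (m.insert c0 pre.length) hl'
            (by intro c
                rw [PySem.Dict.contains_insert, hc]
                by_cases h : c = c0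
                · subst h; simp
                · simp [h])
            (by intro c hcmem
                rcases List.mem_append.mp hcmem with h | h
                · have hne : c ≠ c0 := fun h' => hmem (h' ▸ h)
                  rw [PySem.Dict.getD_insert]
                  simp only [hne, if_false]
                  exact hg c h
                · simp only [List.mem_singleton] at h; subst h; exact hw)]
        simp [List.map_cons]; ring

-- A's signature as a positional sum
lemma sigA_eq_sum (l : List Char) :
    sigA l = (l.map (fun c => (10:Int) ^ (l.idxOf c))).sum := by
  have := sigA_inv l l [] 0 PySem.Dict.empty (by simp)
    (by intro c; simp [PySem.Dict.contains_empty]) (by intro c h; cases h)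
  simpa [sigA] using this

-- B's signature as the grouped sum over the deduplicated list
lemma sigB_eq_sum (l : List Char) :
    sigB l = ((PySem.List.dedup l).map
      (fun c => (l.count c : Int) * (10:Int) ^ (l.idxOf c))).sum := by
  rw [sigB, PySem.List.foldl_add, ← PySem.List.dedup_eq_ofList]
  simp only [Int.zero_add]
  apply congrArg
  apply List.map_congr_left
  intro c hc
  have hcl : c ∈ l := (PySem.List.mem_dedup _ _).mp hc
  rw [PySem.List.count_eq, index?_of_mem l c hcl]
  rfl

-- grouping a positional sum by (distinct) value
lemma sum_map_eq_dedup_sum (l : List Char) (f : Char → Int) :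
    (l.map f).sum = ((PySem.List.dedup l).map (fun c => (l.count c : Int) * f c)).sum := by
  have h1 := Finset.sum_list_map_count l f
  have h2 := Finset.sum_list_map_count (PySem.List.dedup l) (fun c => (l.count c : Int) * f c)
  have hfin : (PySem.List.dedup l).toFinset = l.toFinset := by
    ext x; simp [List.mem_toFinset]
  rw [h1, h2, hfin]
  apply Finset.sum_congr rfl
  intro x hx
  have hxd : x ∈ PySem.List.dedup l := by
    rw [PySem.List.mem_dedup]; exact List.mem_toFinset.mp hx
  have hcd : (PySem.List.dedup l).count x = 1 :=
    List.count_eq_one_of_mem (PySem.List.nodup_dedup l) hxd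
  rw [hcd, one_smul, nsmul_eq_mul]

-- the two signatures agree
lemma sigA_eq_sigB (l : List Char) : sigA l = sigB l := by
  rw [sigA_eq_sum, sigB_eq_sum, sum_map_eq_dedup_sum]

-- ===== VERDICT (by name: the statement is the Claim_ definition above) =====
theorem findSpecificPattern_spec : Claim_equal_findSpecificPattern := by
  intro Dict pattern _
  unfold Spec_findSpecificPattern findSpecificPattern findSpecificPattern_alt
  rw [PySem.List.foldl_append_ite_eq_filter]
  simp only [List.nil_append]
  apply List.filter_congr
  intro w _
  simp [sigA_eq_sigB]
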